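-- pv_equiv track=rewrite | github.com/jmazenko/CodilitySolutions | Ladder.py | Ladder
-- ===== SOURCE A (Python) =====
-- def Ladder(A, B):
--     # a ladder has A[k] rungs. You initially step on rung 1 or rung 2, and ascend either 1 or 2 rungs with every subsequent step
--     # after your last step, you must be standing on rung number A[k], not non-existent rung above it
--     # number of ways of climbing can be large, so we take number of ways modulo 2^P for some integer P
--     # build and return array results, where results[k] = (number of ways of climbing a ladder with A[k] rungs) modulo (2^B[i])
--     L = max(A)
--     P_max = max(B)
--
--     fib = [0] * (L+2)
--     fib[1] = 1
--     for i in range(2, L + 2):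
--         fib[i] = (fib[i-1] + fib[i-2]) & ((1 << P_max) - 1)
--
--     results = [0] * len(A)
--
--     for idx in range(len(A)):
--         results[idx] = fib[A[idx]+1] & ((1 << B[idx]) - 1)
--
--     return results
-- ===== SOURCE B (Python) =====
-- def _fib_pair(n, m):
--     # (F(n) % m, F(n+1) % m) by fast doubling on the binary expansion of n
--     if n == 0:
--         return (0, 1 % m)
--     a, b = _fib_pair(n >> 1, m)
--     c = (a * (2 * b - a)) % m
--     d = (a * a + b * b) % m
--     if n & 1:
--         return (d, (c + d) % m)
--     return (c, d)
--
-- def Ladder(A, B):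
--     res = []
--     for k in range(len(A)):
--         m = 1 << B[k]
--         res.append(_fib_pair(A[k] + 1, m)[0])
--     return res
-- ===== Notes on version B (the rewrite author's own statement) =====
-- stated objective: alternative
-- what changed: Replaced the shared linear DP table of Fibonacci numbers mod 2^max(B) by an independent fast-doubling computation of F(A[k]+1) mod 2^B[k] for each query, recursing on the binary expansion of the index.
-- outside the precondition, e.g. on Ladder([-2, 3], [4, 4]): A returns [3, 3], B raises RecursionError
import Mathlib
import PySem

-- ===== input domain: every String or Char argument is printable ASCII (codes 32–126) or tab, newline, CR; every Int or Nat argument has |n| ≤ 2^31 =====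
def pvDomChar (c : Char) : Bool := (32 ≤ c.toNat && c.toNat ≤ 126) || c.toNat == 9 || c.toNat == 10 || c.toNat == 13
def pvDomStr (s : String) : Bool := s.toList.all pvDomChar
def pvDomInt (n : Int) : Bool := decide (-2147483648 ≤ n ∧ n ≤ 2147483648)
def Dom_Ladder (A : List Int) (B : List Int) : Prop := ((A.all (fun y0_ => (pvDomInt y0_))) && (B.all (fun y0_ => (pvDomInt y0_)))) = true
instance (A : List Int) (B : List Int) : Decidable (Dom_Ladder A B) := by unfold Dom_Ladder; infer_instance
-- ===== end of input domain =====

-- B replaces A's shared linear Fibonacci DP table (mod 2^max(B)) by an independent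
-- fast-doubling computation of F(A[k]+1) mod 2^B[k] per query (objective: alternative).


-- ===== PORT A =====
-- loop body of A's table-filling loop: fib[i] = (fib[i-1] + fib[i-2]) & mask
-- (i ≥ 2 in the loop, so i.toNat is exact; pyGetD/List.set with default: the indices are in
-- range under Pre_, where Python would otherwise raise IndexError)
def pvStepA (mask : Int) (t : List Int) (i : Int) : List Int :=
  t.set i.toNat (PySem.Int.band (PySem.List.pyGetD t (i-1) 0 + PySem.List.pyGetD t (i-2) 0) mask)

def Ladder (A : List Int) (B : List Int) : List Int :=
  match PySem.List.max? A (fun x => x), PySem.List.max? B (fun x => x) with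
  | some L, some P =>
    -- (1 << P_max) - 1 : exact for 0 ≤ P (Pre_; Python raises ValueError on a negative shift)
    let mask := (1 : Int) <<< P.toNat - 1
    let fib0 := List.replicate (L + 2).toNat 0        -- [0] * (L+2) (empty for L+2 ≤ 0, as in Python)
    let fib1 := fib0.set 1 1                          -- fib[1] = 1; IndexError when the table is shorter (excluded by Pre_)
    let fib := (PySem.List.pyRange 2 (L + 2) 1).foldl (pvStepA mask) fib1
    (PySem.List.pyRange 0 (A.length : Int) 1).map (fun idx =>
      PySem.Int.band (PySem.List.pyGetD fib (PySem.List.pyGetD A idx 0 + 1) 0)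
        ((1 : Int) <<< (PySem.List.pyGetD B idx 0).toNat - 1))
  | _, _ => []   -- max() of an empty sequence raises ValueError (excluded by Pre_)

-- ===== PORT B =====
-- fast doubling: (F(n) % m, F(n+1) % m).  n : Nat since under Pre_ the Python argument
-- A[k]+1 is ≥ 0 (B's Python does not terminate for negative n); n >> 1 is n / 2, n & 1 is n % 2.
def pvFibPair (n : Nat) (m : Int) : Int × Int :=
  if h : n = 0 then (0, PySem.Int.mod 1 m)
  else
    let p := pvFibPair (n / 2) m
    let a := p.1
    let b := p.2
    let c := PySem.Int.mod (a * (2 * b - a)) m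
    let d := PySem.Int.mod (a * a + b * b) m
    if n % 2 = 1 then (d, PySem.Int.mod (c + d) m) else (c, d)
  decreasing_by exact Nat.div_lt_self (Nat.pos_of_ne_zero h) (by omega)

def Ladder_alt (A : List Int) (B : List Int) : List Int :=
  (List.range A.length).foldl (fun (res : List Int) (k : Nat) =>
    -- m = 1 << B[k] : exact for 0 ≤ B[k] (Pre_)
    let m := (1 : Int) <<< (PySem.List.pyGetD B (k : Int) 0).toNat
    res ++ [(pvFibPair (PySem.List.pyGetD A (k : Int) 0 + 1).toNat m).1]) []

-- ===== PRECONDITION & SPEC =====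
-- Pre_ excludes the inputs on which A raises (empty A, all elements of A equal to -1, a B shorter
-- than A, a negative entry among the used B[k]) and lists A containing an element below -1, where
-- A's returned value is an accident of Python's negative-index wraparound into the fib table
-- (B's recursion does not return there).
def Pre_Ladder (A : List Int) (B : List Int) : Prop :=
  A ≠ [] ∧ A.length ≤ B.length ∧ (∀ a ∈ A, -1 ≤ a) ∧ (∃ a ∈ A, 0 ≤ a) ∧
    (∀ k, k < A.length → 0 ≤ B.getD k 0)
instance (A : List Int) (B : List Int) : Decidable (Pre_Ladder A B) := by
  unfold Pre_Ladder; infer_instance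
def pvWitness_Ladder : List Int × List Int := ([4, 4, 5, 5, 1], [3, 2, 4, 3, 1])

def Spec_Ladder (A : List Int) (B : List Int) (out : List Int) : Prop := out = Ladder_alt A B
instance (A : List Int) (B : List Int) (out : List Int) : Decidable (Spec_Ladder A B out) := by
  unfold Spec_Ladder; infer_instance

-- ===== CLAIM (what is proved, stated in full; the proofs are below) =====
def Claim_equal_Ladder : Prop := ∀ (A : List Int) (B : List Int), Dom_Ladder A B → Pre_Ladder A B → Spec_Ladder A B (Ladder A B)

-- ===== LEMMAS AND PROOFS =====

-- the value of A's table at index j (fib[1] is stored unreduced)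
def pvTabN (M : Nat) (j : Nat) : Nat := if j = 1 then 1 else Nat.fib j % M

lemma pvTabN_mod (M : Nat) (j : Nat) : pvTabN M j % M = Nat.fib j % M := by
  unfold pvTabN; split_ifs with h
  · subst h; simp [Nat.fib_one]
  · exact Nat.mod_mod_of_dvd _ dvd_rfl

lemma pvStepA_val (Pt j : Nat) :
    PySem.Int.band ((pvTabN (2^Pt) (j+1) : Int) + (pvTabN (2^Pt) j : Int)) ((2^Pt - 1 : Nat) : Int)
      = (pvTabN (2^Pt) (j+2) : Int) := by
  have : ((pvTabN (2^Pt) (j+1) : Int) + (pvTabN (2^Pt) j : Int))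
      = ((pvTabN (2^Pt) (j+1) + pvTabN (2^Pt) j : Nat) : Int) := by push_cast; ring
  rw [this, PySem.Int.band_natCast, Nat.and_two_pow_sub_one_eq_mod]
  have : (pvTabN (2^Pt) (j+1) + pvTabN (2^Pt) j) % 2^Pt = Nat.fib (j+2) % 2^Pt := by
    rw [Nat.add_mod, pvTabN_mod, pvTabN_mod, ← Nat.add_mod, Nat.fib_add_two,
      Nat.add_comm (Nat.fib j)]
  rw [this]
  simp [pvTabN]

-- invariant of A's table-filling loop
lemma pvFold_spec (Pt len : Nat) (t0 : List Int) (h0 : t0.length = len)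
    (hi0 : t0.getD 0 0 = (pvTabN (2^Pt) 0 : Int)) (hi1 : t0.getD 1 0 = (pvTabN (2^Pt) 1 : Int)) :
    ∀ n, 2 + n ≤ len →
      ((List.range n).foldl (fun (t : List Int) (k : Nat) => pvStepA ((2^Pt - 1 : Nat) : Int) t (2 + (k : Int))) t0).length = len ∧
      ∀ j, j < 2 + n →
        ((List.range n).foldl (fun (t : List Int) (k : Nat) => pvStepA ((2^Pt - 1 : Nat) : Int) t (2 + (k : Int))) t0).getD j 0
          = (pvTabN (2^Pt) j : Int) := by
  intro n
  induction n with
  | zero =>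
    intro _
    refine ⟨by simpa using h0, ?_⟩
    intro j hj
    interval_cases j <;> simpa
  | succ n ih =>
    intro hn
    have hn' : 2 + n ≤ len := by omega
    obtain ⟨hl, hv⟩ := ih hn'
    rw [List.range_succ, List.foldl_append]
    simp only [List.foldl_cons, List.foldl_nil]
    set t := (List.range n).foldl (fun (t : List Int) (k : Nat) => pvStepA ((2^Pt - 1 : Nat) : Int) t (2 + (k : Int))) t0 with ht
    have hidx : ((2 : Int) + (n : Int)).toNat = n + 2 := by omega
    have hget1 : PySem.List.pyGetD t (2 + (n : Int) - 1) 0 = (pvTabN (2^Pt) (n+1) : Int) := by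
      have : (2 : Int) + (n : Int) - 1 = ((n + 1 : Nat) : Int) := by omega
      rw [this, PySem.List.pyGetD_natCast]
      exact hv (n+1) (by omega)
    have hget2 : PySem.List.pyGetD t (2 + (n : Int) - 2) 0 = (pvTabN (2^Pt) n : Int) := by
      have : (2 : Int) + (n : Int) - 2 = ((n : Nat) : Int) := by omega
      rw [this, PySem.List.pyGetD_natCast]
      exact hv n (by omega)
    simp only [pvStepA]
    rw [hget1, hget2, hidx, pvStepA_val]
    constructor
    · simpa using hl
    · intro j hj
      by_cases hje : j = n + 2
      · subst hje
        rw [List.getD_eq_getElem?_getD, List.getElem?_set_self (by omega)]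
        simp
      · rw [List.getD_eq_getElem?_getD, List.getElem?_set_ne (i := n+2) (j := j) (by omega), ← List.getD_eq_getElem?_getD]
        exact hv j (by omega)

lemma pvCast_mod (M : Nat) (x : Nat) : ((x % M : Nat) : Int) = (x : Int) % (M : Int) := by
  push_cast
  ring

lemma pvFibCast (q : Nat) :
    (Nat.fib (2*q) : Int) = (Nat.fib q : Int) * (2 * (Nat.fib (q+1) : Int) - (Nat.fib q : Int)) := by
  have hle : Nat.fib q ≤ 2 * Nat.fib (q+1) := le_trans Nat.fib_le_fib_succ (by omega)
  rw [Nat.fib_two_mul]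
  push_cast [Nat.cast_sub hle]
  ring

-- fast-doubling correctness, everything mod M > 0
lemma pvFibPair_spec (M : Nat) (hM : 0 < M) :
    ∀ n : Nat, pvFibPair n ((M : Nat) : Int)
      = (((Nat.fib n % M : Nat) : Int), ((Nat.fib (n+1) % M : Nat) : Int)) := by
  intro n
  induction n using Nat.strong_induction_on with
  | _ n ih =>
    rw [pvFibPair]
    by_cases h0 : n = 0
    · subst h0
      have hMpos : (0 : Int) < (M : Int) := by exact_mod_cast hM
      simp [PySem.Int.mod_eq_emod_of_pos hMpos, Nat.fib_zero, Nat.fib_one]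
    · simp only [h0, dite_false]
      have ihq := ih (n / 2) (Nat.div_lt_self (Nat.pos_of_ne_zero h0) (by omega))
      set q := n / 2 with hq
      have hMpos : (0 : Int) < (M : Int) := by exact_mod_cast hM
      have hmm : ∀ z : Int, PySem.Int.mod z (M : Int) = z % (M : Int) :=
        fun z => PySem.Int.mod_eq_emod_of_pos hMpos
      rw [ihq]
      simp only [hmm]
      set x := (Nat.fib q : Int) with hx
      set y := (Nat.fib (q+1) : Int) with hy
      have hxm : ((Nat.fib q % M : Nat) : Int) = x % (M : Int) := pvCast_mod M _
      have hym : ((Nat.fib (q+1) % M : Nat) : Int) = y % (M : Int) := pvCast_mod M _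
      have hc : (x % M * (2 * (y % M) - x % M)) % (M : Int) = ((Nat.fib (2*q) % M : Nat) : Int) := by
        have h1 : Int.ModEq (M : Int) (x % M) x := Int.emod_emod_of_dvd x dvd_rfl
        have h2 : Int.ModEq (M : Int) (y % M) y := Int.emod_emod_of_dvd y dvd_rfl
        have := h1.mul ((((Int.ModEq.refl (2 : Int)).mul h2).sub h1))
        rw [pvCast_mod, pvFibCast]
        exact this
      have hd : (x % M * (x % M) + y % M * (y % M)) % (M : Int) = ((Nat.fib (2*q+1) % M : Nat) : Int) := by
        have h1 : Int.ModEq (M : Int) (x % M) x := Int.emod_emod_of_dvd x dvd_rfl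
        have h2 : Int.ModEq (M : Int) (y % M) y := Int.emod_emod_of_dvd y dvd_rfl
        have := (h1.mul h1).add (h2.mul h2)
        rw [pvCast_mod]
        have hfib : (Nat.fib (2*q+1) : Int) = x * x + y * y := by
          rw [Nat.fib_two_mul_add_one]; push_cast; ring
        rw [hfib]
        exact this
      have hcd : (((Nat.fib (2*q) % M : Nat) : Int) + ((Nat.fib (2*q+1) % M : Nat) : Int)) % (M : Int)
          = ((Nat.fib (2*q+2) % M : Nat) : Int) := by
        have : ((Nat.fib (2*q) % M : Nat) : Int) + ((Nat.fib (2*q+1) % M : Nat) : Int)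
            = ((Nat.fib (2*q) % M + Nat.fib (2*q+1) % M : Nat) : Int) := by push_cast; ring
        have hfib : Nat.fib (2*q+2) = Nat.fib (2*q) + Nat.fib (2*q+1) := Nat.fib_add_two
        have hnat : (Nat.fib (2*q) % M + Nat.fib (2*q+1) % M) % M = Nat.fib (2*q+2) % M := by
          rw [← Nat.add_mod, hfib]
        rw [this, ← hnat, pvCast_mod]
      rw [hxm, hym]
      by_cases hpar : n % 2 = 1
      · have hn : n = 2*q + 1 := by omega
        rw [if_pos hpar, hc, hd, hcd, hn]
      · have hn : n = 2*q := by omega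
        rw [if_neg hpar, hc, hd, hn]

lemma pvShift (k : Nat) : (1 : Int) <<< k = ((2^k : Nat) : Int) := by
  rw [Int.shiftLeft_eq]
  push_cast
  ring

lemma pvMaskCast (k : Nat) : (1 : Int) <<< k - 1 = ((2^k - 1 : Nat) : Int) := by
  rw [pvShift, Nat.cast_sub (Nat.one_le_two_pow)]
  simp

-- masking a table entry with (1 << b) - 1, b ≤ Pt, yields fib j mod 2^b
lemma pvFinalMask (Pt b j : Nat) (hb : b ≤ Pt) :
    PySem.Int.band ((pvTabN (2^Pt) j : Int)) ((2^b - 1 : Nat) : Int)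
      = ((Nat.fib j % 2^b : Nat) : Int) := by
  rw [show ((pvTabN (2^Pt) j : Nat) : Int) = ((pvTabN (2^Pt) j : Nat) : Int) from rfl,
    PySem.Int.band_natCast, Nat.and_two_pow_sub_one_eq_mod]
  congr 1
  unfold pvTabN
  split_ifs with h
  · subst h; simp [Nat.fib_one]
  · exact Nat.mod_mod_of_dvd _ (pow_dvd_pow 2 hb)

-- ===== VERDICT helper proof =====
theorem Ladder_spec : Claim_equal_Ladder := by
  intro A B _ hpre
  obtain ⟨hAne, hlen, hge, ⟨a0, ha0mem, ha0⟩, hBk⟩ := hpre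
  unfold Spec_Ladder
  -- the maxima exist
  obtain ⟨L, hL⟩ : ∃ L, PySem.List.max? A (fun x => x) = some L := by
    cases h : PySem.List.max? A (fun x => x) with
    | none => exact absurd ((PySem.List.max?_eq_none_iff A _).mp h) hAne
    | some L => exact ⟨L, rfl⟩
  have hBne : B ≠ [] := by
    intro h; subst h
    rw [List.length_nil, Nat.le_zero, List.length_eq_zero_iff] at hlen
    exact hAne hlen
  obtain ⟨P, hP⟩ : ∃ P, PySem.List.max? B (fun x => x) = some P := by
    cases h : PySem.List.max? B (fun x => x) with
    | none => exact absurd ((PySem.List.max?_eq_none_iff B _).mp h) hBne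
    | some P => exact ⟨P, rfl⟩
  have hAmax : ∀ y ∈ A, y ≤ L := PySem.List.max?_isMax hL
  have hBmax : ∀ y ∈ B, y ≤ P := PySem.List.max?_isMax hP
  have hLpos : 0 ≤ L := le_trans ha0 (hAmax a0 ha0mem)
  have hAlen : 0 < A.length := List.length_pos_iff.mpr hAne
  have hB0mem : B.getD 0 0 ∈ B := by
    rw [List.getD_eq_getElem?_getD, List.getElem?_eq_getElem (by omega)]
    exact List.getElem_mem _
  have hPpos : 0 ≤ P := le_trans (hBk 0 hAlen) (hBmax _ hB0mem)
  set Pt := P.toNat with hPt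
  set Lt := L.toNat with hLt
  set len := Lt + 2 with hlendef
  unfold Ladder
  rw [hL, hP]
  simp only []
  -- table initialisation
  have hrep : (L + 2).toNat = len := by omega
  set t0 : List Int := (List.replicate len (0:Int)).set 1 1 with ht0
  have ht0len : t0.length = len := by simp [ht0]
  have h2len : 2 ≤ len := by omega
  have hlen0 : 0 < len := by omega
  have hlen1 : 1 < (List.replicate len (0:Int)).length := by rw [List.length_replicate]; omega
  have hi0 : t0.getD 0 0 = ((pvTabN (2^Pt) 0 : Nat) : Int) := by
    rw [ht0, List.getD_eq_getElem?_getD, List.getElem?_set_ne (i := 1) (j := 0) (by omega),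
      List.getElem?_replicate, if_pos hlen0]
    simp [pvTabN]
  have hi1 : t0.getD 1 0 = ((pvTabN (2^Pt) 1 : Nat) : Int) := by
    rw [ht0, List.getD_eq_getElem?_getD, List.getElem?_set_self hlen1]
    simp [pvTabN]
  -- rewrite the loop over pyRange 2 (L+2) as a loop over List.range Lt
  have hrange : PySem.List.pyRange 2 (L + 2) 1 = (List.range Lt).map (fun (k : Nat) => 2 + (k : Int)) := by
    rw [PySem.List.pyRange_one, show (L + 2 - 2).toNat = Lt by omega]
  have hmask : (1 : Int) <<< Pt - 1 = ((2^Pt - 1 : Nat) : Int) := pvMaskCast Pt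
  obtain ⟨hflen, hfval⟩ := pvFold_spec Pt len t0 ht0len hi0 hi1 Lt (by omega)
  set F := (List.range Lt).foldl (fun (t : List Int) (k : Nat) => pvStepA ((2^Pt - 1 : Nat) : Int) t (2 + (k : Int))) t0 with hF
  have hfoldeq : (PySem.List.pyRange 2 (L + 2) 1).foldl (pvStepA ((1 : Int) <<< Pt - 1)) t0 = F := by
    rw [hrange, List.foldl_map, hmask]
  -- both sides as maps over List.range A.length
  rw [Ladder_alt]
  rw [PySem.List.foldl_append_singleton_eq_map]
  rw [PySem.List.pyRange_zero]
  rw [show ((A.length : Int)).toNat = A.length by omega]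
  rw [List.map_map]
  simp only [List.nil_append]
  apply List.map_congr_left
  intro k hk
  rw [List.mem_range] at hk
  simp only [Function.comp_apply]
  rw [hrep, hfoldeq]
  -- per-element values
  have hAk : PySem.List.pyGetD A (k : Int) 0 = A.getD k 0 := PySem.List.pyGetD_natCast A k 0
  have hBkk : PySem.List.pyGetD B (k : Int) 0 = B.getD k 0 := PySem.List.pyGetD_natCast B k 0
  set a := A.getD k 0 with hadef
  set b := B.getD k 0 with hbdef
  have hamem : a ∈ A := by
    rw [hadef, List.getD_eq_getElem?_getD, List.getElem?_eq_getElem hk]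
    exact List.getElem_mem _
  have hbmem : b ∈ B := by
    rw [hbdef, List.getD_eq_getElem?_getD, List.getElem?_eq_getElem (by omega)]
    exact List.getElem_mem _
  have ha1 : -1 ≤ a := hge a hamem
  have ha2 : a ≤ L := hAmax a hamem
  have hb0 : 0 ≤ b := hBk k hk
  have hbP : b ≤ P := hBmax b hbmem
  set j := (a + 1).toNat with hj
  have hjcast : ((j : Nat) : Int) = a + 1 := by omega
  have hjlt : j < len := by omega
  have hfj : PySem.List.pyGetD F (a + 1) 0 = ((pvTabN (2^Pt) j : Nat) : Int) := by
    rw [← hjcast, PySem.List.pyGetD_natCast]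
    exact hfval j (by omega)
  have hbk : b.toNat ≤ Pt := by omega
  rw [hAk, hBkk, hfj, pvMaskCast, pvFinalMask Pt b.toNat j hbk]
  -- B side
  rw [pvShift, pvFibPair_spec (2^(b.toNat)) (Nat.two_pow_pos _)]
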